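-- pv_equiv track=rewrite | github.com/AlibabaResearch/DAMO-ConvAI | spokenwoz/Finetuning/space_baseline/space_word/space/data/fields/gen_field.py | _bucket_by_turn
-- ===== SOURCE A (Python) =====
-- from collections import OrderedDict, defaultdict
--
-- def _bucket_by_turn(encoded_data):
--     turn_bucket = {}
--     for dial in encoded_data:
--         turn_len = len(dial)
--         if turn_len not in turn_bucket:
--             turn_bucket[turn_len] = []
--         turn_bucket[turn_len].append(dial)
--     return OrderedDict(sorted(turn_bucket.items(), key=lambda i: i[0]))
-- ===== SOURCE B (Python) =====
-- from collections import OrderedDict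
--
--
-- def _bucket_by_turn(encoded_data):
--     lengths = sorted(set(map(len, encoded_data)))
--     return OrderedDict((k, [dial for dial in encoded_data if len(dial) == k])
--                        for k in lengths)
-- ===== Notes on version B (the rewrite author's own statement) =====
-- stated objective: simpler
-- what changed: Instead of mutably bucketing dialogues into a dict and sorting its items afterwards, B computes the sorted distinct turn lengths once and builds each bucket by filtering the input per length.
import Mathlib
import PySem

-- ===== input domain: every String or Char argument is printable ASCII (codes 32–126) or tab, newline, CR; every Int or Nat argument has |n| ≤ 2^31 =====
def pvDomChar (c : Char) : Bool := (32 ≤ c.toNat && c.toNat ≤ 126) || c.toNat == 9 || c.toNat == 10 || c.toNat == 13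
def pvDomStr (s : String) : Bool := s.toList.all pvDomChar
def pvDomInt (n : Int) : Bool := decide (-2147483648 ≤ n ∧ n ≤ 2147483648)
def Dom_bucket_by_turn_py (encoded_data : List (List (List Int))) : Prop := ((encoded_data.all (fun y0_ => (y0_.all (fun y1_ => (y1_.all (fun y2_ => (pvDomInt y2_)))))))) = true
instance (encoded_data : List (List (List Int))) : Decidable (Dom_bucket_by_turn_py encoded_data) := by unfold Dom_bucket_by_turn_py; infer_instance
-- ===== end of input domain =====

-- B replaces A's mutable dict bucketing + item sort by mapping each sorted distinct length to a filter of the input (simpler; same return value).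

-- ===== PORT A =====
def bucket_by_turn_py (encoded_data : List (List (List Int))) : List (Int × List (List (List Int))) :=
  let turn_bucket : PySem.Dict Int (List (List (List Int))) :=
    encoded_data.foldl (fun turn_bucket dial =>
      let turn_len : Int := dial.length
      let turn_bucket :=
        if turn_bucket.contains turn_len then turn_bucket
        else turn_bucket.insert turn_len []
      turn_bucket.insert turn_len (turn_bucket.getD turn_len [] ++ [dial]))
      PySem.Dict.empty
  PySem.List.sorted turn_bucket.items (fun i => i.1)

-- ===== PORT B =====
def bucket_by_turn_py_alt (encoded_data : List (List (List Int))) : List (Int × List (List (List Int))) :=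
  let lengths := PySem.List.sorted (PySem.Set.ofList (encoded_data.map (fun dial => (dial.length : Int)))) (fun x => x)
  lengths.map (fun k => (k, encoded_data.filter (fun dial => (dial.length : Int) == k)))

-- ===== PRECONDITION & SPEC =====
def Spec_bucket_by_turn_py (encoded_data : List (List (List Int))) (out : List (Int × List (List (List Int)))) : Prop := out = bucket_by_turn_py_alt encoded_data
instance (encoded_data : List (List (List Int))) (out : List (Int × List (List (List Int)))) : Decidable (Spec_bucket_by_turn_py encoded_data out) := by unfold Spec_bucket_by_turn_py; infer_instance

-- ===== CLAIM (what is proved, stated in full; the proofs are below) =====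
def Claim_equal_bucket_by_turn_py : Prop := ∀ (encoded_data : List (List (List Int))), Dom_bucket_by_turn_py encoded_data → Spec_bucket_by_turn_py encoded_data (bucket_by_turn_py encoded_data)

-- ===== LEMMAS AND PROOFS =====

-- the bucket of a length k: k paired with the dialogues of that length, in input order
def pvF (xs : List (List (List Int))) (k : Int) : Int × List (List (List Int)) :=
  (k, xs.filter (fun dial => (dial.length : Int) == k))

-- the distinct lengths in first-occurrence order
def pvKeys (xs : List (List (List Int))) : List Int :=
  PySem.Set.ofList (xs.map (fun dial => (dial.length : Int)))

lemma pvKeys_append (xs : List (List (List Int))) (a : List (List Int)) :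
    pvKeys (xs ++ [a]) = PySem.Set.add (pvKeys xs) (a.length : Int) := by
  simp [pvKeys, PySem.Set.ofList, List.foldl_append]

-- A's loop builds exactly the first-occurrence buckets
lemma pvItemsA (xs : List (List (List Int))) :
    (xs.foldl (fun turn_bucket dial =>
      let turn_len : Int := dial.length
      let turn_bucket :=
        if turn_bucket.contains turn_len then turn_bucket
        else turn_bucket.insert turn_len []
      turn_bucket.insert turn_len (turn_bucket.getD turn_len [] ++ [dial]))
      (PySem.Dict.empty : PySem.Dict Int (List (List (List Int))))).items
    = (pvKeys xs).map (pvF xs) := by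
  induction xs using List.reverseRecOn with
  | nil => rfl
  | append_singleton xs a ih =>
    rw [List.foldl_append]
    set d := (xs.foldl (fun turn_bucket dial =>
      let turn_len : Int := dial.length
      let turn_bucket :=
        if turn_bucket.contains turn_len then turn_bucket
        else turn_bucket.insert turn_len []
      turn_bucket.insert turn_len (turn_bucket.getD turn_len [] ++ [dial]))
      (PySem.Dict.empty : PySem.Dict Int (List (List (List Int))))) with hd
    have hkeysd : d.keys = pvKeys xs := by
      simp only [PySem.Dict.keys, ih, List.map_map]
      exact List.map_congr_left (fun j _ => rfl) |>.trans (List.map_id _)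
    have hnd : d.keys.Nodup := by
      rw [hkeysd]; exact PySem.Set.nodup_ofList _
    have hcont : d.contains (a.length : Int) = true ↔ (a.length : Int) ∈ pvKeys xs := by
      simp [PySem.Dict.contains, ih, pvF, List.any_eq_true]
    simp only [List.foldl_cons, List.foldl_nil]
    by_cases hc : (a.length : Int) ∈ pvKeys xs
    · -- the length is already a key: the existing bucket is extended
      have hct : d.contains (a.length : Int) = true := hcont.mpr hc
      have hmem : ((a.length : Int), xs.filter (fun dial => (dial.length : Int) == (a.length : Int))) ∈ d.items := by
        rw [ih]
        exact List.mem_map.mpr ⟨_, hc, rfl⟩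
      have hget : d.getD (a.length : Int) [] = xs.filter (fun dial => (dial.length : Int) == (a.length : Int)) := by
        simp [PySem.Dict.getD, PySem.Dict.get?_of_mem_items d hmem hnd]
      have hadd : PySem.Set.add (pvKeys xs) (a.length : Int) = pvKeys xs := by
        simp [PySem.Set.add, PySem.Set.contains, hc]
      simp only [hct, if_true, hget]
      rw [PySem.Dict.items_insert_of_contains d _ hct, ih, List.map_map,
        pvKeys_append, hadd]
      refine List.map_congr_left (fun j _ => ?_)
      by_cases hjk : j = (a.length : Int)
      · subst hjk
        simp [pvF, List.filter_append]
      · have : ((pvF xs j).1 == (a.length : Int)) = false := by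
          simp [pvF, hjk]
        simp only [Function.comp, this, Bool.false_eq_true, if_false]
        simp [pvF, List.filter_append, Ne.symm hjk]
    · -- first dialogue of this length: a new bucket is appended
      have hcf : d.contains (a.length : Int) = false := by
        cases h : d.contains (a.length : Int)
        · rfl
        · exact absurd (hcont.mp h) hc
      have hnotin : ((a.length : Int)) ∉ xs.map (fun dial => (dial.length : Int)) := by
        intro h; exact hc ((PySem.Set.mem_ofList _ _).mpr h)
      have hfilnil : xs.filter (fun dial => (dial.length : Int) == (a.length : Int)) = [] := by
        refine List.filter_eq_nil_iff.mpr (fun dl hdl => ?_)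
        simp only [beq_iff_eq]
        intro he
        exact hnotin (List.mem_map.mpr ⟨dl, hdl, he⟩)
      simp only [hcf, Bool.false_eq_true, if_false]
      rw [PySem.Dict.items_insert_of_contains _ _ (PySem.Dict.contains_insert_self d _ _),
        PySem.Dict.items_insert_of_not_contains d _ hcf,
        PySem.Dict.getD_insert_self]
      have hadd : PySem.Set.add (pvKeys xs) (a.length : Int) = pvKeys xs ++ [(a.length : Int)] := by
        simp [PySem.Set.add, PySem.Set.contains, hc]
      rw [pvKeys_append, hadd, List.map_append, List.map_append, ih]
      congr 1
      · -- existing buckets are unchanged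
        rw [List.map_map]
        refine List.map_congr_left (fun j hj => ?_)
        have hjk : j ≠ (a.length : Int) := fun he => hc (he ▸ hj)
        have hfst : ((pvF xs j).1 == (a.length : Int)) = false := by simp [pvF, hjk]
        simp only [Function.comp, hfst, Bool.false_eq_true, if_false]
        simp [pvF, List.filter_append, Ne.symm hjk]
      · simp [pvF, List.filter_append, hfilnil]

-- ===== VERDICT (by name: the statement is the Claim_ definition above) =====
theorem bucket_by_turn_py_spec : Claim_equal_bucket_by_turn_py := by
  intro xs _
  unfold Spec_bucket_by_turn_py bucket_by_turn_py bucket_by_turn_py_alt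
  simp only [pvItemsA]
  have hperm : ((PySem.List.sorted (pvKeys xs) (fun x => x)).map (pvF xs)).Perm
      ((pvKeys xs).map (pvF xs)) :=
    (PySem.List.sorted_perm (pvKeys xs) (fun x => x) false).map _
  have hpw : ((PySem.List.sorted (pvKeys xs) (fun x => x)).map (pvF xs)).Pairwise
      (fun a b => a.1 < b.1) := by
    refine List.Pairwise.map _ (fun j₁ j₂ h => ?_)
      (PySem.List.sorted_ofList_pairwise_lt (xs.map (fun dial => (dial.length : Int))))
    simpa [pvF] using h
  rw [PySem.List.sorted_eq_of_perm_of_pairwise_lt _ _ _ hperm hpw]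
  simp [pvF, pvKeys]
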